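-- pv_equiv track=rewrite | github.com/Gibstick/mips241 | test/big/generate-single-op.py | get_skel
-- ===== SOURCE A (Python) =====
-- def get_skel(s):
--     """Get a tuple representing an instrution skeleton.
--
--     Args:
--         s: String of chars in {0, 1, x} of the skeleton
--     Returns:
--         Tuple (before, length, after), where
--         - before is the number before the mask
--         - length is the length of x's in the mask
--         - after is the number after the mask
--     """
--     i = 0
--     # get number before x's
--     before = 0
--     while i < len(s):
--         if s[i] != 'x':
--             assert s[i] == '0' or s[i] == '1'
--             before += before
--             before += int(s[i])
--         else:
--             break
--         i += 1
--     # get number of x's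
--     xlen = 0
--     while i < len(s):
--         if s[i] == 'x':
--             xlen += 1
--         else:
--             break
--         i += 1
--     # get number of 0s after x's
--     zerolen = 0
--     while i < len(s):
--         if s[i] == '0':
--             zerolen += 1
--         else:
--             break
--         i += 1
--     # get number afer x's
--     after = 0
--     while i < len(s):
--         assert s[i] == '0' or s[i] == '1'
--         after += after
--         after += int(s[i])
--         i += 1
--
--     return (before, xlen, zerolen, after)
-- ===== SOURCE B (Python) =====
-- def get_skel(s):
--     pre, _, tail = s.partition('x')
--     mid = tail.lstrip('x')
--     xlen = len(s) - len(pre) - len(mid)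
--     rest = mid.lstrip('0')
--     zerolen = len(mid) - len(rest)
--     before = int(pre, 2) if pre else 0
--     after = int(rest, 2) if rest else 0
--     return (before, xlen, zerolen, after)
-- ===== Notes on version B (the rewrite author's own statement) =====
-- stated objective: idiomatic
-- what changed: Replaced A's four manual index-scanning while-loops with digit-by-digit accumulation by string splitting (partition at the first 'x', lstrip of the x-run and zero-run) plus int(...,2) conversion of the two binary pieces.
import Mathlib
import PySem

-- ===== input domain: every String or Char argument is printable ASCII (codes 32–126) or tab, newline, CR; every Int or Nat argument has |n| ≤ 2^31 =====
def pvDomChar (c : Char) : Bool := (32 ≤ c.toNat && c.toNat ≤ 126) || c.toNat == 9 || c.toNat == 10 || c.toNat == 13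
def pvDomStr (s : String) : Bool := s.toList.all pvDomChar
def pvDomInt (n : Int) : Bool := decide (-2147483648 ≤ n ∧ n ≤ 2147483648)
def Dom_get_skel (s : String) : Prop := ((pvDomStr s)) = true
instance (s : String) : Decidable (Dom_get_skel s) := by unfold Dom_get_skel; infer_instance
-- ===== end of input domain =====

-- B replaces A's four manual index-scanning loops by partition/lstrip splitting plus int(...,2) conversion (objective: idiomatic/simpler).

-- ===== PORT A =====
-- first while loop: accumulate binary digits until an 'x' (int(s[i]) ported as if-digit; exact on '0'/'1', i.e. inside Pre_)
def pvPhaseBefore : List Char → Int → Int × List Char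
  | [], b => (b, [])
  | c :: r, b => if c != 'x' then pvPhaseBefore r (b + b + (if c == '1' then 1 else 0)) else (b, c :: r)

-- second while loop: count leading 'x's
def pvPhaseX : List Char → Int → Int × List Char
  | [], n => (n, [])
  | c :: r, n => if c == 'x' then pvPhaseX r (n + 1) else (n, c :: r)

-- third while loop: count leading '0's
def pvPhaseZero : List Char → Int → Int × List Char
  | [], n => (n, [])
  | c :: r, n => if c == '0' then pvPhaseZero r (n + 1) else (n, c :: r)

-- fourth while loop: accumulate remaining binary digits
def pvPhaseAfter : List Char → Int → Int
  | [], a => a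
  | c :: r, a => pvPhaseAfter r (a + a + (if c == '1' then 1 else 0))

def get_skel (s : String) : Int × Int × Int × Int :=
  let p1 := pvPhaseBefore s.toList 0
  let p2 := pvPhaseX p1.2 0
  let p3 := pvPhaseZero p2.2 0
  (p1.1, p2.1, p3.1, pvPhaseAfter p3.2 0)

-- ===== PORT B =====
-- s.partition('x') restricted to the two pieces Source B uses (pre, tail); exact: head/tail around the first 'x'
def pvPartitionX (l : List Char) : List Char × List Char :=
  (l.takeWhile (· != 'x'), (l.dropWhile (· != 'x')).drop 1)

-- int(t, 2); exact for non-empty strings of '0'/'1' (the only ones Source B feeds it inside Pre_)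
def pvBits (l : List Char) : Int := l.foldl (fun a c => 2 * a + (if c == '1' then 1 else 0)) 0

def get_skel_alt (s : String) : Int × Int × Int × Int :=
  let l := s.toList
  let pr := pvPartitionX l
  let mid := pr.2.dropWhile (· == 'x')        -- tail.lstrip('x')
  let xlen : Int := (l.length : Int) - pr.1.length - mid.length
  let rest := mid.dropWhile (· == '0')        -- mid.lstrip('0')
  let zerolen : Int := (mid.length : Int) - rest.length
  ((if pr.1 ≠ [] then pvBits pr.1 else 0), xlen, zerolen,
   (if rest ≠ [] then pvBits rest else 0))

-- ===== PRECONDITION & SPEC =====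
-- Pre_ excludes exactly the strings on which A raises (AssertionError): a char outside {0,1,x}, or an 'x' after the first x-run.
def Pre_get_skel (s : String) : Prop :=
  (s.toList.all (fun c => c == '0' || c == '1' || c == 'x')) = true ∧
  (((s.toList.dropWhile (· != 'x')).dropWhile (· == 'x')).all (· != 'x')) = true
instance (s : String) : Decidable (Pre_get_skel s) := by unfold Pre_get_skel; infer_instance

def pvWitness_get_skel : String := "10xx001"

def Spec_get_skel (s : String) (out : Int × Int × Int × Int) : Prop := out = get_skel_alt s
instance (s : String) (out : Int × Int × Int × Int) : Decidable (Spec_get_skel s out) := by unfold Spec_get_skel; infer_instance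

-- ===== CLAIM (what is proved, stated in full; the proofs are below) =====
def Claim_equal_get_skel : Prop := ∀ (s : String), Dom_get_skel s → Pre_get_skel s → Spec_get_skel s (get_skel s)

-- ===== LEMMAS AND PROOFS =====

lemma pvPhaseBefore_eq (l : List Char) (b : Int) :
    pvPhaseBefore l b =
      (List.foldl (fun a c => 2 * a + (if c == '1' then 1 else 0)) b (l.takeWhile (· != 'x')),
       l.dropWhile (· != 'x')) := by
  induction l generalizing b with
  | nil => rfl
  | cons c r ih =>
    by_cases h : (c != 'x') = true
    · simp [pvPhaseBefore, List.takeWhile, List.dropWhile, h, ih]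
      ring_nf
    · simp [pvPhaseBefore, List.takeWhile, List.dropWhile, h]

lemma pvPhaseX_eq (l : List Char) (n : Int) :
    pvPhaseX l n = (n + (l.takeWhile (· == 'x')).length, l.dropWhile (· == 'x')) := by
  induction l generalizing n with
  | nil => simp [pvPhaseX]
  | cons c r ih =>
    by_cases h : (c == 'x') = true
    · simp [pvPhaseX, List.takeWhile, List.dropWhile, h, ih]
      ring
    · simp [pvPhaseX, List.takeWhile, List.dropWhile, h]

lemma pvPhaseZero_eq (l : List Char) (n : Int) :
    pvPhaseZero l n = (n + (l.takeWhile (· == '0')).length, l.dropWhile (· == '0')) := by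
  induction l generalizing n with
  | nil => simp [pvPhaseZero]
  | cons c r ih =>
    by_cases h : (c == '0') = true
    · simp [pvPhaseZero, List.takeWhile, List.dropWhile, h, ih]
      ring
    · simp [pvPhaseZero, List.takeWhile, List.dropWhile, h]

lemma pvPhaseAfter_eq (l : List Char) (a : Int) :
    pvPhaseAfter l a = List.foldl (fun a c => 2 * a + (if c == '1' then 1 else 0)) a l := by
  induction l generalizing a with
  | nil => rfl
  | cons c r ih =>
    simp [pvPhaseAfter, List.foldl, ih]
    ring_nf

lemma pvDropWhile_head_false {p : Char → Bool} {l r : List Char} {c : Char}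
    (h : l.dropWhile p = c :: r) : p c = false := by
  induction l with
  | nil => simp at h
  | cons d t ih =>
    by_cases hd : p d = true
    · exact ih (by simpa [List.dropWhile, hd] using h)
    · have hd' : p d = false := by simpa using hd
      simp [List.dropWhile, hd'] at h
      exact h.1 ▸ hd'

lemma pvTakeDropLen (p : Char → Bool) (l : List Char) :
    (l.takeWhile p).length + (l.dropWhile p).length = l.length := by
  induction l with
  | nil => rfl
  | cons c t ih =>
    by_cases h : p c = true <;> simp [List.takeWhile, List.dropWhile, h] <;> omega

lemma pvIfBits (l : List Char) : (if l ≠ [] then pvBits l else 0) = pvBits l := by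
  by_cases h : l = [] <;> simp [h, pvBits]

theorem get_skel_spec_aux (s : String) : get_skel s = get_skel_alt s := by
  simp only [get_skel, get_skel_alt, pvPartitionX, pvPhaseBefore_eq, pvPhaseX_eq,
    pvPhaseZero_eq, pvPhaseAfter_eq, pvIfBits]
  set l := s.toList with hl
  have hsplit := pvTakeDropLen (· != 'x') l
  rcases hr : l.dropWhile (· != 'x') with _ | ⟨c, r'⟩
  · rw [hr] at hsplit
    simp only [hr, List.drop_nil, List.dropWhile_nil, List.takeWhile_nil,
      List.length_nil, List.foldl_nil, Prod.mk.injEq, pvBits]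
    simp only [List.length_nil] at hsplit
    and_intros <;> (try rfl) <;> (try trivial) <;> (push_cast; omega)
  · have hc : c = 'x' := by simpa using pvDropWhile_head_false hr
    subst hc
    rw [hr] at hsplit
    have hsplit' := pvTakeDropLen (· == 'x') r'
    have hsplit'' := pvTakeDropLen (· == '0') (r'.dropWhile (· == 'x'))
    have hx : (('x' : Char) == 'x') = true := by decide
    simp only [hr, List.drop_one, List.tail_cons, List.takeWhile_cons,
      List.dropWhile_cons, hx, if_true, List.length_cons, pvBits, Prod.mk.injEq]
    simp only [List.length_cons] at hsplit
    and_intros <;> (try rfl) <;> (try trivial) <;> (push_cast; omega)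

-- ===== VERDICT (by name: the statement is the Claim_ definition above) =====
theorem get_skel_spec : Claim_equal_get_skel := by
  intro s _ _
  unfold Spec_get_skel
  exact get_skel_spec_aux s
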